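-- pv_equiv track=rewrite | github.com/OIEIEIO/4-model-SOT | run10.py | extract_components_mentioned
-- ===== SOURCE A (Python) =====
-- from typing import Dict, List, Tuple, Optional, Set, Any
--
-- def extract_components_mentioned(text: str, components_db: List[Dict]) -> int:
--     """Count component names mentioned in response"""
--     if not components_db:
--         return 0
--
--     count = 0
--     text_lower = text.lower()
--
--     for component in components_db:
--         part_name = str(component.get('part_name', '')).lower()
--         if part_name and len(part_name) > 3 and part_name in text_lower:
--             count += 1
--
--     return count
-- ===== SOURCE B (Python) =====
-- def _lowered_name(component):
--     return str(component.get('part_name', '')).lower()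
--
--
-- def extract_components_mentioned(text, components_db):
--     """Count component names mentioned in response.
--
--     Different strategy from A: tally the multiplicity of each (lowered) part
--     name once, then run the substring search only once per DISTINCT name,
--     summing the multiplicities of the names that pass (A's redundant
--     nonempty check is dropped since len > 3 already implies nonempty).
--     """
--     haystack = text.lower()
--     tally = {}
--     for component in components_db:
--         name = _lowered_name(component)
--         tally[name] = tally.get(name, 0) + 1
--     return sum(k for name, k in tally.items()
--                if len(name) > 3 and name in haystack)
-- ===== Notes on version B (the rewrite author's own statement) =====
-- stated objective: alternative
-- what changed: B tallies the multiplicity of each lowered part name in one pass, then filters the DISTINCT names by the length/substring test and sums their multiplicities, instead of A's per-row substring test with a running counter.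
import Mathlib
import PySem

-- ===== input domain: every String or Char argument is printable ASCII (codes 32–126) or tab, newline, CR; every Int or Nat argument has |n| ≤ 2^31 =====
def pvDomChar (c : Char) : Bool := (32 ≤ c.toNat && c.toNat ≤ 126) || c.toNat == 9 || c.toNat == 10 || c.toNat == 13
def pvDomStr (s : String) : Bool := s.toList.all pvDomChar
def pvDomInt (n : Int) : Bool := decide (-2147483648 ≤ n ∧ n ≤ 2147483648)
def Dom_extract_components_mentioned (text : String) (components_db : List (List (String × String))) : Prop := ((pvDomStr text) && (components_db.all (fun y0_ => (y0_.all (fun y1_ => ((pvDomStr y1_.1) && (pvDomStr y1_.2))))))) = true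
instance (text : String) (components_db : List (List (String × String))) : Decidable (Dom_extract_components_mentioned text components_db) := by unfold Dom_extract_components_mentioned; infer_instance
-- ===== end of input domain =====

-- B tallies the multiplicity of each lowered part name once, then filters the
-- DISTINCT names by the length/substring test and sums their multiplicities.

-- ===== PORT A =====
-- str(component.get('part_name','')) : values are strings here, so str() is the identity
def extract_components_mentioned (text : String) (components_db : List (List (String × String))) : Int :=
  if components_db = [] then 0
  else
    let text_lower := PySem.Str.lower text
    components_db.foldl (fun count component =>
      let part_name := PySem.Str.lower ((PySem.Dict.mk component).getD "part_name" "")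
      if (!(part_name == "")) && decide (3 < PySem.Str.len part_name) && PySem.Str.isIn part_name text_lower
      then count + 1 else count) 0

-- ===== PORT B =====
-- _lowered_name(component)
def pvLoweredName (component : List (String × String)) : String :=
  PySem.Str.lower ((PySem.Dict.mk component).getD "part_name" "")

def extract_components_mentioned_alt (text : String) (components_db : List (List (String × String))) : Int :=
  let haystack := PySem.Str.lower text
  let tally := components_db.foldl (fun d component =>
      let name := pvLoweredName component
      d.insert name (d.getD name 0 + 1)) (PySem.Dict.empty : PySem.Dict String Int)
  -- sum(k for name, k in tally.items() if len(name) > 3 and name in haystack)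
  ((tally.items.filter (fun kv =>
      decide (3 < PySem.Str.len kv.1) && PySem.Str.isIn kv.1 haystack)).map
    (fun kv => kv.2)).sum

-- ===== PRECONDITION & SPEC =====
def Spec_extract_components_mentioned (text : String) (components_db : List (List (String × String))) (out : Int) : Prop := out = extract_components_mentioned_alt text components_db
instance (text : String) (components_db : List (List (String × String))) (out : Int) : Decidable (Spec_extract_components_mentioned text components_db out) := by unfold Spec_extract_components_mentioned; infer_instance

-- ===== CLAIM (what is proved, stated in full; the proofs are below) =====
def Claim_equal_extract_components_mentioned : Prop := ∀ (text : String) (components_db : List (List (String × String))), Dom_extract_components_mentioned text components_db → Spec_extract_components_mentioned text components_db (extract_components_mentioned text components_db)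

-- ===== LEMMAS AND PROOFS =====

-- A's triple test equals B's double test: len > 3 already forces nonemptiness
theorem pvPredEq (tl n : String) :
    ((!(n == "")) && decide (3 < PySem.Str.len n) && PySem.Str.isIn n tl)
      = (decide (3 < PySem.Str.len n) && PySem.Str.isIn n tl) := by
  by_cases h : (3 : Int) < PySem.Str.len n
  · have hne : (n == "") = false := by
      apply beq_eq_false_iff_ne.mpr
      intro he; subst he; simp [PySem.Str.len_eq] at h
    rw [hne]; rfl
  · have hd : decide (3 < PySem.Str.len n) = false := by simpa using h
    rw [hd]; simp

-- summing a mapped filter equals summing an if-guarded map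
theorem pvSumFilter (l : List String) (q : String → Bool) (c : String → Int) :
    ((l.filter q).map c).sum = (l.map (fun k => if q k then c k else 0)).sum := by
  induction l with
  | nil => rfl
  | cons x xs ih =>
    by_cases hx : q x
    · simp [hx, ih]
    · simp [hx, ih]

-- picking the unique matching entry out of a Nodup list
theorem pvSumPick (l : List String) (x : String) (c : String → Int)
    (hnd : l.Nodup) (hx : x ∈ l) :
    (l.map (fun k => if k = x then c k else 0)).sum = c x := by
  induction l with
  | nil => cases hx
  | cons y l ih =>
    rcases List.nodup_cons.mp hnd with ⟨hy, hnd'⟩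
    by_cases hxy : y = x
    · subst hxy
      have hz : (l.map (fun k => if k = y then c k else 0)).sum = 0 := by
        apply List.sum_eq_zero
        intro z hzm
        rcases List.mem_map.mp hzm with ⟨k, hk, rfl⟩
        have hky : k ≠ y := fun h => hy (h ▸ hk)
        simp [hky]
      simp [hz]
    · have hx' : x ∈ l := by
        rcases List.mem_cons.mp hx with h | h
        · exact absurd h.symm hxy
        · exact h
      simp [hxy, ih hnd' hx']

-- sum of (count in names) over any Nodup cover of names is the weighted count
theorem pvSumCount (p : String → Bool) (names : List String) :
    ∀ (l : List String), l.Nodup → (∀ y ∈ names, y ∈ l) →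
    (l.map (fun k => if p k then (names.count k : Int) else 0)).sum
      = (names.countP p : Int) := by
  induction names with
  | nil =>
    intro l _ _
    have hz : ∀ z ∈ l.map (fun k => if p k then ((List.count k ([] : List String) : Nat) : Int) else 0), z = 0 := by
      intro z hzm
      rcases List.mem_map.mp hzm with ⟨k, _, rfl⟩
      simp
    rw [List.sum_eq_zero hz]
    simp
  | cons x xs ih =>
    intro l hnd hmem
    have hxl : x ∈ l := hmem x (List.mem_cons_self)
    have hxs : ∀ y ∈ xs, y ∈ l := fun y hy => hmem y (List.mem_cons_of_mem _ hy)
    have hpt : ∀ k, (if p k then (((x :: xs).count k : Nat) : Int) else 0)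
        = (if p k then ((xs.count k : Nat) : Int) else 0)
          + (if k = x then (if p x then (1 : Int) else 0) else 0) := by
      intro k
      by_cases hk : k = x
      · subst hk
        by_cases hp : p k
        · simp only [hp, if_true, List.count_cons_self]
          push_cast; ring
        · simp [hp]
      · have hc : (x :: xs).count k = xs.count k := by
          have hk2 : ¬ x = k := fun h => hk h.symm
          simp [hk2]
        simp [hc, hk]
    calc (l.map (fun k => if p k then (((x :: xs).count k : Nat) : Int) else 0)).sum
        = (l.map (fun k => (if p k then ((xs.count k : Nat) : Int) else 0)
            + (if k = x then (if p x then (1 : Int) else 0) else 0))).sum := by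
          exact congrArg List.sum (List.map_congr_left (fun k _ => hpt k))
      _ = (l.map (fun k => if p k then ((xs.count k : Nat) : Int) else 0)).sum
            + (l.map (fun k => if k = x then (if p x then (1 : Int) else 0) else 0)).sum := by
          rw [← List.sum_map_add]
      _ = (xs.countP p : Int) + (if p x then (1 : Int) else 0) := by
          rw [ih l hnd hxs, pvSumPick l x _ hnd hxl]
      _ = ((x :: xs).countP p : Int) := by
          by_cases hp : p x <;> simp [hp]

-- B's tally loop is Counter over the lowered names
theorem pvTallyEq (components_db : List (List (String × String))) :
    components_db.foldl (fun d component =>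
      let name := pvLoweredName component
      d.insert name (d.getD name 0 + 1)) (PySem.Dict.empty : PySem.Dict String Int)
      = PySem.Dict.counter (components_db.map pvLoweredName) := by
  rw [← PySem.Dict.foldl_insert_getD_add_one_eq_counter, List.foldl_map]

-- B's value is the weighted count of the test over the lowered names
theorem pvAltEq (text : String) (components_db : List (List (String × String))) :
    extract_components_mentioned_alt text components_db
      = (components_db.countP (fun c =>
          decide (3 < PySem.Str.len (pvLoweredName c)) && PySem.Str.isIn (pvLoweredName c) (PySem.Str.lower text)) : Int) := by
  show ((((components_db.foldl _ (PySem.Dict.empty : PySem.Dict String Int)).items.filter _).map _).sum) = _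
  rw [pvTallyEq, PySem.Dict.items_counter, List.filter_map, List.map_map]
  rw [show ((fun kv : String × Int => decide (3 < PySem.Str.len kv.1)
        && PySem.Str.isIn kv.1 (PySem.Str.lower text)) ∘
        (fun k => (k, ((components_db.map pvLoweredName).count k : Int))))
      = (fun k => decide (3 < PySem.Str.len k) && PySem.Str.isIn k (PySem.Str.lower text)) from rfl]
  rw [show ((fun kv : String × Int => kv.2) ∘
        (fun k => (k, ((components_db.map pvLoweredName).count k : Int))))
      = (fun k => ((components_db.map pvLoweredName).count k : Int)) from rfl]
  rw [pvSumFilter, pvSumCount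
        (fun k => decide (3 < PySem.Str.len k) && PySem.Str.isIn k (PySem.Str.lower text))
        (components_db.map pvLoweredName) (PySem.Set.ofList (components_db.map pvLoweredName))
        (PySem.Set.nodup_ofList _) (fun y hy => (PySem.Set.mem_ofList _ _).mpr hy),
      List.countP_map]
  rfl

-- ===== VERDICT (by name: the statement is the Claim_ definition above) =====
theorem extract_components_mentioned_spec : Claim_equal_extract_components_mentioned := by
  intro text components_db _
  unfold Spec_extract_components_mentioned
  rw [pvAltEq]
  unfold extract_components_mentioned
  by_cases hdb : components_db = []
  · subst hdb; simp
  · simp only [hdb, if_false]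
    rw [PySem.List.foldl_if_add_one (p := fun component =>
      (!(PySem.Str.lower ((PySem.Dict.mk component).getD "part_name" "") == ""))
        && decide (3 < PySem.Str.len (PySem.Str.lower ((PySem.Dict.mk component).getD "part_name" "")))
        && PySem.Str.isIn (PySem.Str.lower ((PySem.Dict.mk component).getD "part_name" "")) (PySem.Str.lower text))]
    rw [show (fun component => (!(PySem.Str.lower ((PySem.Dict.mk component).getD "part_name" "") == ""))
          && decide (3 < PySem.Str.len (PySem.Str.lower ((PySem.Dict.mk component).getD "part_name" "")))
          && PySem.Str.isIn (PySem.Str.lower ((PySem.Dict.mk component).getD "part_name" "")) (PySem.Str.lower text))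
        = (fun c => decide (3 < PySem.Str.len (pvLoweredName c))
          && PySem.Str.isIn (pvLoweredName c) (PySem.Str.lower text))
      from funext fun c => pvPredEq (PySem.Str.lower text)
        (PySem.Str.lower ((PySem.Dict.mk c).getD "part_name" ""))]
    rw [zero_add]
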